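-- pv_equiv track=rewrite | github.com/mikaelk/HSI | HSI_analysis/segment_particles.py | guess_wrapup
-- ===== SOURCE A (Python) =====
-- def guess_wrapup(guess_dict):
--     final_guess =  {}
--     for roi, guesses in guess_dict.items():
--         final_guess[roi] = ""
--         highest = max(guesses.values())
--         for compound, guess_count in guesses.items():
--             if guess_count == highest:
--                 final_guess[roi] += f"{compound}, "
--     return final_guess
-- ===== SOURCE B (Python) =====
-- def guess_wrapup(guess_dict):
--     final_guess = {}
--     for roi, guesses in guess_dict.items():
--         groups = {}
--         for compound, guess_count in guesses.items():
--             groups.setdefault(guess_count, []).append(compound)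
--         highest = max(groups)
--         final_guess[roi] = "".join(f"{compound}, " for compound in groups[highest])
--     return final_guess
-- ===== Notes on version B (the rewrite author's own statement) =====
-- stated objective: alternative
-- what changed: B inverts the per-roi representation: it builds a groups dict from guess count to the list of compounds with that count, takes max over the dict's keys and joins the one group it looks up, instead of A's scan for the max value followed by a second filtering scan that appends to final_guess[roi].
import Mathlib
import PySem

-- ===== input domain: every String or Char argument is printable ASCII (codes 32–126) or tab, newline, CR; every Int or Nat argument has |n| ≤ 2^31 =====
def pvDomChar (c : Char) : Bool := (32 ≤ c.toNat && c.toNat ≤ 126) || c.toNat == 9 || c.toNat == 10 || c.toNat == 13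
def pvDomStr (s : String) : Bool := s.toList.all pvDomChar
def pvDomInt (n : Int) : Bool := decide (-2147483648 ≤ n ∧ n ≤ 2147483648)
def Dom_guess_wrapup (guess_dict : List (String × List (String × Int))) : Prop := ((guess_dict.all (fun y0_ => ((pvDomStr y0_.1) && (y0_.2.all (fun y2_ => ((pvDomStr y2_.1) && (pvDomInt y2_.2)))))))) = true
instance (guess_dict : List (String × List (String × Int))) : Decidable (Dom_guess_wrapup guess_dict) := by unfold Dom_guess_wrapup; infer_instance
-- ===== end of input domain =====

-- B groups compounds by guess count into a dict and looks up the maximal count,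
-- instead of A's scan-for-max-then-rescan-to-filter; same cost, alternative decomposition.

-- ===== PORT A =====
-- literal transliteration of A: build final_guess dict, per roi take max of values,
-- then append "compound, " for every entry reaching that max.
def guess_wrapup (guess_dict : List (String × List (String × Int))) : List (String × String) :=
  (guess_dict.foldl (fun (fg : PySem.Dict String String) rg =>
      let fg := fg.insert rg.1 ""
      match PySem.List.max? (rg.2.map (·.2)) (fun v => v) with
      | none => fg  -- Python raises ValueError here (max of empty); excluded by Pre_
      | some highest =>
          rg.2.foldl (fun fg p =>
            if p.2 == highest then fg.insert rg.1 (fg.getD rg.1 "" ++ p.1 ++ ", ") else fg) fg)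
    PySem.Dict.empty).items

-- ===== PORT B =====
-- literal transliteration of B: per roi build groups : count → list of compounds
-- (setdefault/append = Dict.modify), take max over the keys, join that group's compounds.
def guess_wrapup_alt (guess_dict : List (String × List (String × Int))) : List (String × String) :=
  (guess_dict.foldl (fun (fg : PySem.Dict String String) rg =>
      let groups : PySem.Dict Int (List String) :=
        rg.2.foldl (fun d p => d.modify p.2 [] (· ++ [p.1])) PySem.Dict.empty
      match PySem.List.max? groups.keys (fun v => v) with
      | none => fg  -- Python raises ValueError here (max of empty); excluded by Pre_
      | some highest =>
          fg.insert rg.1 (String.join ((groups.getD highest []).map (fun c => c ++ ", "))))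
    PySem.Dict.empty).items

-- ===== PRECONDITION & SPEC =====
-- Pre_ excludes inputs with an empty inner dict (A's max(guesses.values()) raises ValueError
-- there) and inputs whose association-list encoding carries duplicate roi or compound keys
-- (a Python dict cannot hold them, so that encoding is ambiguous).
def Pre_guess_wrapup (guess_dict : List (String × List (String × Int))) : Prop :=
  (guess_dict.map (·.1)).Nodup ∧ ∀ p ∈ guess_dict, p.2 ≠ [] ∧ (p.2.map (·.1)).Nodup
instance (guess_dict : List (String × List (String × Int))) : Decidable (Pre_guess_wrapup guess_dict) := by unfold Pre_guess_wrapup; infer_instance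
def pvWitness_guess_wrapup : (List (String × List (String × Int))) := [("roi1", [("a", 1), ("b", 2)]), ("roi2", [("c", 0)])]
def Spec_guess_wrapup (guess_dict : List (String × List (String × Int))) (out : List (String × String)) : Prop := out = guess_wrapup_alt guess_dict
instance (guess_dict : List (String × List (String × Int))) (out : List (String × String)) : Decidable (Spec_guess_wrapup guess_dict out) := by unfold Spec_guess_wrapup; infer_instance

-- ===== CLAIM (what is proved, stated in full; the proofs are below) =====
def Claim_equal_guess_wrapup : Prop := ∀ (guess_dict : List (String × List (String × Int))), Dom_guess_wrapup guess_dict → Pre_guess_wrapup guess_dict → Spec_guess_wrapup guess_dict (guess_wrapup guess_dict)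

-- ===== LEMMAS AND PROOFS =====

-- String.join peels off its head element.
theorem pv_join_cons (s : String) (l : List String) :
    String.join (s :: l) = s ++ String.join l := by
  have key : ∀ (t : List String) (a : String),
      t.foldl (· ++ ·) a = a ++ t.foldl (· ++ ·) "" := by
    intro t
    induction t with
    | nil => intro a; simp
    | cons b t ih =>
        intro a
        simp only [List.foldl_cons]
        rw [ih (a ++ b), ih ("" ++ b), String.empty_append, String.append_assoc]
  simp only [String.join, List.foldl_cons]
  rw [key l ("" ++ s), String.empty_append]

-- A's inner loop over one roi: repeated "final_guess[roi] += compound + ', '" on a dict whose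
-- entry at roi was just set, collapses to one insert of the joined matching compounds.
theorem pv_innerA (roi : String) (h : Int) (gs : List (String × Int)) :
    ∀ (fg0 : PySem.Dict String String) (s : String),
      gs.foldl (fun fg p =>
          if p.2 == h then fg.insert roi (fg.getD roi "" ++ p.1 ++ ", ") else fg)
        (fg0.insert roi s)
      = fg0.insert roi
          (s ++ String.join ((gs.filter (fun p => p.2 == h)).map (fun p => p.1 ++ ", "))) := by
  induction gs with
  | nil =>
      intro fg0 s
      simp [String.join]
  | cons p t ih =>
      intro fg0 s
      simp only [List.foldl_cons]
      cases hp : (p.2 == h) with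
      | true =>
          rw [if_pos rfl, PySem.Dict.getD_insert_self, PySem.Dict.insert_insert_self,
            ih fg0 (s ++ p.1 ++ ", ")]
          simp [hp, pv_join_cons, String.append_assoc]
      | false =>
          rw [if_neg (by simp), ih fg0 s]
          simp [hp]
-- Python's max over a list of distinct values equals max over the original list: max? is
-- membership-determined on Int (the maximum value is unique).
theorem pv_max_congr (xs ys : List Int) (hmem : ∀ a : Int, a ∈ ys ↔ a ∈ xs) (hne : xs ≠ []) :
    PySem.List.max? ys (fun v => v) = PySem.List.max? xs (fun v => v) := by
  have hmax_all : ∀ (t : List Int) (a : Int), ∀ z ∈ a :: t, z ≤ t.foldl max a := by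
    intro t a z hz
    rcases List.mem_cons.mp hz with hz | hz
    · exact hz ▸ (PySem.List.le_foldl_max t a).1
    · exact (PySem.List.le_foldl_max t a).2 z hz
  cases xs with
  | nil => exact absurd rfl hne
  | cons x t =>
      cases ys with
      | nil =>
          have : x ∈ ([] : List Int) := (hmem x).mpr (List.mem_cons_self)
          simp at this
      | cons y s =>
          rw [PySem.List.max?_id_cons y s, PySem.List.max?_id_cons x t, Option.some.injEq]
          have m1 : s.foldl max y ∈ x :: t := by
            rcases PySem.List.foldl_max_mem s y with h | h
            · exact (hmem _).mp (by rw [h]; exact List.mem_cons_self)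
            · exact (hmem _).mp (List.mem_cons_of_mem y h)
          have m2 : t.foldl max x ∈ y :: s := by
            rcases PySem.List.foldl_max_mem t x with h | h
            · exact (hmem _).mpr (by rw [h]; exact List.mem_cons_self)
            · exact (hmem _).mpr (List.mem_cons_of_mem x h)
          exact le_antisymm (hmax_all t x _ m1) (hmax_all s y _ m2)

-- B's grouping loop, looked up at h, yields exactly the compounds whose count is h, in order.
theorem pv_groups_getD (gs : List (String × Int)) (h : Int) :
    (gs.foldl (fun d p => d.modify p.2 [] (· ++ [p.1])) PySem.Dict.empty).getD h []
      = (gs.filter (fun p => p.2 == h)).map (·.1) := by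
  have key := PySem.Dict.getD_foldl_modify_append
    (gs.map (fun p => (p.2, p.1))) (PySem.Dict.empty (κ := Int) (ν := List String)) h
  rw [List.foldl_map] at key
  simpa [List.filter_map, List.map_map, Function.comp] using key

-- B's grouping loop has the roi's distinct counts as keys, in first-occurrence order.
theorem pv_groups_keys (gs : List (String × Int)) :
    (gs.foldl (fun d p => d.modify p.2 [] (· ++ [p.1])) PySem.Dict.empty).keys
      = PySem.Set.ofList (gs.map (·.2)) := by
  have key := PySem.Dict.keys_foldl_modify_key gs (fun p => p.2) []
    (fun _ p => (· ++ [p.1])) PySem.Dict.empty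
  simpa using key

-- One roi step of A's outer loop equals one roi step of B's outer loop (inner dict nonempty).
theorem pv_step (fg : PySem.Dict String String) (rg : String × List (String × Int))
    (hne : rg.2 ≠ []) :
    (let fg1 := fg.insert rg.1 ""
     match PySem.List.max? (rg.2.map (·.2)) (fun v => v) with
     | none => fg1
     | some highest =>
         rg.2.foldl (fun fg p =>
           if p.2 == highest then fg.insert rg.1 (fg.getD rg.1 "" ++ p.1 ++ ", ") else fg) fg1)
    = (let groups : PySem.Dict Int (List String) :=
         rg.2.foldl (fun d p => d.modify p.2 [] (· ++ [p.1])) PySem.Dict.empty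
       match PySem.List.max? groups.keys (fun v => v) with
       | none => fg
       | some highest =>
           fg.insert rg.1 (String.join ((groups.getD highest []).map (fun c => c ++ ", ")))) := by
  obtain ⟨roi, gs⟩ := rg
  simp only at hne
  dsimp only
  rw [pv_groups_keys gs,
    pv_max_congr (gs.map (·.2)) (PySem.Set.ofList (gs.map (·.2)))
      (fun a => PySem.Set.mem_ofList (gs.map (·.2)) a) (by simpa using hne)]
  cases gs with
  | nil => exact absurd rfl hne
  | cons q qs =>
      rw [List.map_cons, PySem.List.max?_id_cons]
      dsimp only
      rw [pv_innerA roi _ (q :: qs) fg "", String.empty_append, pv_groups_getD, List.map_map]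
      rfl

-- ===== VERDICT (by name: the statement is the Claim_ definition above) =====
theorem guess_wrapup_spec : Claim_equal_guess_wrapup := by
  intro gd _ hpre
  unfold Spec_guess_wrapup guess_wrapup guess_wrapup_alt
  congr 1
  apply PySem.List.foldl_congr_mem
  intro fg rg hmem
  exact pv_step fg rg (hpre.2 rg hmem).1
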